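-- pv_equiv track=rewrite | github.com/farhadhassani/check-safety-suite | src/validation.py | validate_aba_routing
-- ===== SOURCE A (Python) =====
-- def validate_aba_routing(routing_number):
--     """
--     Validates ABA routing number using checksum.
--     3-7-1-3-7-1-3-7-1 weighting.
--     """
--     if not routing_number or len(routing_number) != 9 or not routing_number.isdigit():
--         return False
--
--     digits = [int(d) for d in routing_number]
--     weights = [3, 7, 1, 3, 7, 1, 3, 7]
--
--     checksum = sum(d * w for d, w in zip(digits[:8], weights))
--     check_digit = (10 - (checksum % 10)) % 10
--
--     return check_digit == digits[8]
-- ===== SOURCE B (Python) =====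
-- # Table-driven checksum: precomputed (3*d) % 10 and (7*d) % 10 lookup tables,
-- # accumulated over the three 3-digit chunks of the routing number.
-- _W3 = (0, 3, 6, 9, 2, 5, 8, 1, 4, 7)
-- _W7 = (0, 7, 4, 1, 8, 5, 2, 9, 6, 3)
--
--
-- def validate_aba_routing(routing_number):
--     """
--     Validates ABA routing number using checksum.
--     Table lookups for the 3- and 7-weighted digits, per 3-digit chunk.
--     """
--     if not routing_number or len(routing_number) != 9 or not routing_number.isdigit():
--         return False
--
--     total = 0
--     for i in range(0, 9, 3):
--         total += (_W3[int(routing_number[i])]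
--                   + _W7[int(routing_number[i + 1])]
--                   + int(routing_number[i + 2]))
--     return total % 10 == 0
-- ===== Notes on version B (the rewrite author's own statement) =====
-- stated objective: alternative
-- what changed: B replaces A's multiply-and-derive-check-digit pass by a table-driven checksum: two precomputed (3*d)%10 and (7*d)%10 lookup tables, accumulated over the three 3-digit chunks, with a final divisibility-by-10 test.
import Mathlib
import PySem

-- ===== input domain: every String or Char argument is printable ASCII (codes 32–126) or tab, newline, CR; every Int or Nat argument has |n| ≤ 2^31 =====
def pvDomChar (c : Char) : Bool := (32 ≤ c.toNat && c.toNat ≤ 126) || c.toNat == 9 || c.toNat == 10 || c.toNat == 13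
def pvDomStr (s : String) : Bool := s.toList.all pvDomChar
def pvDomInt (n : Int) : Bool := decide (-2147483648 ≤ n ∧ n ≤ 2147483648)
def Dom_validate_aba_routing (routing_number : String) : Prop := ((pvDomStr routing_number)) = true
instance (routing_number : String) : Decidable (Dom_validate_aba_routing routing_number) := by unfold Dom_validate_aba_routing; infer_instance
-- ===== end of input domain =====

-- B is a table-driven checksum: precomputed (3*d)%10 and (7*d)%10 lookup tables,
-- accumulated over the three 3-digit chunks, with a final divisibility-by-10 test.

-- ===== PORT A =====
-- int(d) for a single char d that passed isdigit (ASCII '0'..'9') is exactly c.toNat - 48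
def validate_aba_routing (routing_number : String) : Bool :=
  if routing_number.toList.isEmpty || (PySem.Str.len routing_number != 9)
      || (!PySem.Str.strIsdigit routing_number) then
    false
  else
    let digits : List Int := routing_number.toList.map (fun c => (c.toNat : Int) - 48)
    let weights : List Int := [3, 7, 1, 3, 7, 1, 3, 7]
    let checksum : Int :=
      ((PySem.List.slice digits none (some 8)).zip weights).foldl
        (fun acc p => acc + p.1 * p.2) 0
    let check_digit : Int := PySem.Int.mod (10 - PySem.Int.mod checksum 10) 10
    check_digit == PySem.List.pyGetD digits 8 0

-- ===== PORT B =====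
def pvW3 : List Int := [0, 3, 6, 9, 2, 5, 8, 1, 4, 7]
def pvW7 : List Int := [0, 7, 4, 1, 8, 5, 2, 9, 6, 3]

-- indexing with pyGetD: the guard ensures every index used is in range, and the
-- table indices are digit values 0..9; int(s[i]) for an ASCII digit char is c.toNat - 48
def validate_aba_routing_alt (routing_number : String) : Bool :=
  if routing_number.toList.isEmpty || (PySem.Str.len routing_number != 9)
      || (!PySem.Str.strIsdigit routing_number) then
    false
  else
    let cs := routing_number.toList
    let dig : Int → Int := fun i => ((PySem.List.pyGetD cs i '0').toNat : Int) - 48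
    let total : Int :=
      (PySem.List.pyRange 0 9 3).foldl
        (fun acc i =>
          acc + (PySem.List.pyGetD pvW3 (dig i) 0
                 + PySem.List.pyGetD pvW7 (dig (i + 1)) 0
                 + dig (i + 2))) 0
    PySem.Int.mod total 10 == 0

-- ===== PRECONDITION & SPEC =====
def Spec_validate_aba_routing (routing_number : String) (out : Bool) : Prop := out = validate_aba_routing_alt routing_number
instance (routing_number : String) (out : Bool) : Decidable (Spec_validate_aba_routing routing_number out) := by unfold Spec_validate_aba_routing; infer_instance

-- ===== CLAIM (what is proved, stated in full; the proofs are below) =====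
def Claim_equal_validate_aba_routing : Prop := ∀ (routing_number : String), Dom_validate_aba_routing routing_number → Spec_validate_aba_routing routing_number (validate_aba_routing routing_number)

-- ===== LEMMAS AND PROOFS =====

-- the tables compute (3*k) % 10 and (7*k) % 10 for digit values k
theorem pvW3_lookup (k : Int) (h0 : 0 ≤ k) (h9 : k ≤ 9) :
    PySem.List.pyGetD pvW3 k 0 = PySem.Int.mod (3 * k) 10 := by
  interval_cases k <;> decide

theorem pvW7_lookup (k : Int) (h0 : 0 ≤ k) (h9 : k ≤ 9) :
    PySem.List.pyGetD pvW7 k 0 = PySem.Int.mod (7 * k) 10 := by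
  interval_cases k <;> decide

-- ===== VERDICT (by name: the statement is the Claim_ definition above) =====
set_option maxHeartbeats 1000000 in
theorem validate_aba_routing_spec : Claim_equal_validate_aba_routing := by
  intro s _
  unfold Spec_validate_aba_routing validate_aba_routing validate_aba_routing_alt
  by_cases hg : (s.toList.isEmpty || (PySem.Str.len s != 9) || (!PySem.Str.strIsdigit s)) = true
  · rw [if_pos hg, if_pos hg]
  · rw [if_neg hg, if_neg hg]
    rw [Bool.not_eq_true, Bool.or_eq_false_iff, Bool.or_eq_false_iff] at hg
    obtain ⟨⟨-, hlen'⟩, hdig'⟩ := hg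
    have hlen : PySem.Str.len s = 9 := by simpa using hlen'
    have hdig : PySem.Str.strIsdigit s = true := by simpa using hdig'
    have hlen9 : s.toList.length = 9 := by
      have := PySem.Str.len_eq s
      omega
    -- every character is an ASCII digit, so its value is in [0, 10)
    have hall : ∀ c ∈ s.toList, 48 ≤ c.toNat ∧ c.toNat ≤ 57 := by
      intro c hc
      simp only [PySem.Str.strIsdigit, PySem.Chars.strIsdigit, Bool.and_eq_true,
        List.all_eq_true] at hdig
      have h2 := hdig.2 c hc
      simp only [PySem.Chars.isdigit, Bool.and_eq_true, decide_eq_true_eq, Char.le_def] at h2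
      exact ⟨h2.1, h2.2⟩
    match hm : s.toList, hlen9 with
    | [c0, c1, c2, c3, c4, c5, c6, c7, c8], _ =>
      have b0 := hall c0 (by simp [hm]); have b1 := hall c1 (by simp [hm])
      have b2 := hall c2 (by simp [hm]); have b3 := hall c3 (by simp [hm])
      have b4 := hall c4 (by simp [hm]); have b5 := hall c5 (by simp [hm])
      have b6 := hall c6 (by simp [hm]); have b7 := hall c7 (by simp [hm])
      have b8 := hall c8 (by simp [hm])
      rw [Bool.eq_iff_iff]
      rw [(by decide : PySem.List.pyRange 0 9 3 = [0, 3, 6])]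
      simp only [beq_iff_eq, List.map_cons, List.map_nil, List.zip, List.foldl_cons,
        List.foldl_nil, PySem.List.slice, PySem.List.clampIdx, List.length_cons, List.length_nil]
      norm_num [PySem.List.pyGetD_ofNat', (by decide : Int.toNat 8 = 8),
        List.zipWith_cons_cons, List.zipWith_nil_right, List.take_succ_cons, List.take_zero, List.take_nil,
        List.getElem_cons_succ, List.getElem_cons_zero]
      rw [pvW3_lookup _ (by omega) (by omega), pvW3_lookup _ (by omega) (by omega),
        pvW3_lookup _ (by omega) (by omega),
        pvW7_lookup _ (by omega) (by omega), pvW7_lookup _ (by omega) (by omega),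
        pvW7_lookup _ (by omega) (by omega)]
      simp only [PySem.Int.mod_eq_emod_of_pos (by norm_num : (0:Int) < 10)]
      omega
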